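-- pv_equiv track=rewrite | github.com/tukiains/cloudnetpy-legacy | cloudnetpy/ceilo.py | _screen_empty_lines
-- ===== SOURCE A (Python) =====
-- def _screen_empty_lines(data):
--     """Removes empty lines from the list of data."""
--
--     def _parse_empty_lines():
--         return [n for n, _ in enumerate(data) if is_empty_line(data[n])]
--
--     def _parse_data_lines(empty_indices):
--         number_of_data_lines = empty_indices[1] - empty_indices[0] - 1
--         lines = []
--         for line_number in range(number_of_data_lines):
--             lines.append([data[n + line_number + 1] for n in empty_indices])
--         return lines
--
--     empty_lines = _parse_empty_lines()
--     return _parse_data_lines(empty_lines)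
--
-- def is_empty_line(line):
--     """Tests if line in text file is empty."""
--     if line in ('\n', '\r\n'):
--         return True
--     return False
-- ===== SOURCE B (Python) =====
-- def _screen_empty_lines(data):
--     """Removes empty lines from the list of data."""
--     # Streaming pass: the first two empty lines fix the block length, then a
--     # single scan opens a column at each empty line, feeds every unfilled
--     # column from the stream, and the columns are transposed at the end.
--     empties = (i for i, line in enumerate(data) if is_empty_line(line))
--     first = next(empties)
--     length = next(empties) - first - 1
--     cols = []
--     for line in data:
--         cols = [c + [line] if len(c) < length else c for c in cols]
--         if is_empty_line(line):
--             cols.append([])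
--     return [list(row) for row in zip(*cols)]
--
--
-- def is_empty_line(line):
--     """Tests if line in text file is empty."""
--     if line in ('\n', '\r\n'):
--         return True
--     return False
-- ===== Notes on version B (the rewrite author's own statement) =====
-- stated objective: alternative
-- what changed: A randomly indexes data[n+k+1] in nested loops over empty-line indices; B is a streaming single pass that never indexes the data: it derives the block length from the first two empty lines, then walks the lines once, opening a new column at each empty line and appending each subsequent line to every still-unfilled column, and finally transposes the collected columns with zip.
import Mathlib
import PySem

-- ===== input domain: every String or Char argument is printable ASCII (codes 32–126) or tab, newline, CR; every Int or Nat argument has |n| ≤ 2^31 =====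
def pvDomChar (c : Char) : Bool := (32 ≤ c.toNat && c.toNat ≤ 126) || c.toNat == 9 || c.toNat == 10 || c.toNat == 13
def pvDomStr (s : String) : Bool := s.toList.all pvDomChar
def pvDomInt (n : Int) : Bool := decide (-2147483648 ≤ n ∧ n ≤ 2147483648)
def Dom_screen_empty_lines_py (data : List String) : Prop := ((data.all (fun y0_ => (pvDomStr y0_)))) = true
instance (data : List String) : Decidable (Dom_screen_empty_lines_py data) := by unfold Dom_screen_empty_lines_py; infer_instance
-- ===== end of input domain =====

-- B replaces A's nested random indexing by a streaming single pass that opens a column per empty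
-- line, fills columns from the stream, and transposes with zip (objective: alternative, same cost).

-- ===== PORT A =====
def is_empty_line_py (line : String) : Bool :=
  if line == "\n" || line == "\r\n" then true else false

-- A: empty indices, then each output row gathers data[n + line_number + 1] across the empty indices.
def screen_empty_lines_py (data : List String) : List (List String) :=
  let empty_lines : List Int :=
    ((PySem.List.enumerate data).filter
      (fun p => is_empty_line_py ((PySem.List.pyGet? data p.1).getD ""))).map (fun p => p.1)
  let number_of_data_lines : Int :=
    (PySem.List.pyGet? empty_lines 1).getD 0 - (PySem.List.pyGet? empty_lines 0).getD 0 - 1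
  (PySem.List.pyRange 0 number_of_data_lines 1).map (fun line_number =>
    empty_lines.map (fun n => (PySem.List.pyGet? data (n + line_number + 1)).getD ""))

-- ===== PORT B =====
-- first loop of Source B: scan enumerate(data) with the `first` state until the second empty line
-- fixes the block length (none = Python's `length` stays None: fewer than two empty lines).
def findL_py : List (Int × String) → Option Int → Option Int
  | [], _ => none
  | (i, l) :: rest, first =>
    if is_empty_line_py l then
      match first with
      | none => findL_py rest (some i)
      | some f => some (i - f - 1)
    else findL_py rest first

-- body of Source B's second loop: append the line to every unfilled column, open a column on an empty line
def stepCols (L : Int) (cols : List (List String)) (line : String) : List (List String) :=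
  let cols' := cols.map (fun c => if (c.length : Int) < L then c ++ [line] else c)
  if is_empty_line_py line then cols' ++ [[]] else cols'

-- zip(*(c :: rest)): emit a row of heads while every list is nonempty, recursing on the tails
-- (structural recursion on the first column; exact for Python's zip truncation rule).
def zipStarGo (b : List String) (rest : List (List String)) : List (List String) :=
  match b with
  | [] => []
  | x :: xs =>
    if rest.all (fun l => !l.isEmpty) then
      (x :: rest.map (fun l => l.headI)) :: zipStarGo xs (rest.map List.tail)
    else []

def pyZipStar (bs : List (List String)) : List (List String) :=
  match bs with
  | [] => []
  | b :: rest => zipStarGo b rest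

-- B: find the block length, stream the lines through the column collectors, transpose.
-- (Source B's `len(c) < None` TypeError region lies outside Pre_; the port totalises the length with getD 0.)
def screen_empty_lines_py_alt (data : List String) : List (List String) :=
  let L : Int := (findL_py (PySem.List.enumerate data) none).getD 0
  let cols : List (List String) := data.foldl (stepCols L) []
  pyZipStar cols

-- ===== PRECONDITION & SPEC =====
-- Pre_ excludes exactly the inputs where Python A raises IndexError: fewer than two
-- empty lines (empty_indices[1]), or a data[n + line_number + 1] access past the end.
def Pre_screen_empty_lines_py (data : List String) : Prop :=
  let e : List Int :=
    ((List.range data.length).filter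
      (fun n => data.getD n "" == "\n" || data.getD n "" == "\r\n")).map (fun n : Nat => (n : Int))
  2 ≤ e.length ∧ ∀ n ∈ e, n + (e.getD 1 0 - e.getD 0 0 - 1) < (data.length : Int)
instance (data : List String) : Decidable (Pre_screen_empty_lines_py data) := by
  unfold Pre_screen_empty_lines_py; infer_instance

def pvWitness_screen_empty_lines_py : List String := ["\n", "a", "\n", "b"]

def Spec_screen_empty_lines_py (data : List String) (out : List (List String)) : Prop := out = screen_empty_lines_py_alt data
instance (data : List String) (out : List (List String)) : Decidable (Spec_screen_empty_lines_py data out) := by unfold Spec_screen_empty_lines_py; infer_instance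

-- ===== CLAIM (what is proved, stated in full; the proofs are below) =====
def Claim_equal_screen_empty_lines_py : Prop := ∀ (data : List String), Dom_screen_empty_lines_py data → Pre_screen_empty_lines_py data → Spec_screen_empty_lines_py data (screen_empty_lines_py data)

-- ===== LEMMAS AND PROOFS =====

-- what B's second loop leaves in `cols`: one column per empty line of the suffix,
-- holding the next L lines of the stream
def newColsL (L : Int) : List String → List (List String)
  | [] => []
  | line :: rest =>
    (if is_empty_line_py line then [rest.take L.toNat] else []) ++ newColsL L rest

-- one stepCols update followed by filling from `rest` = filling from `line :: rest`
theorem fill_upd (L : Int) (line : String) (rest : List String) (c : List String) :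
    (if (c.length : Int) < L then c ++ [line] else c) ++
      rest.take (L - (((if (c.length : Int) < L then c ++ [line] else c).length : Int))).toNat
    = c ++ (line :: rest).take (L - (c.length : Int)).toNat := by
  split_ifs with h
  · have h1 : (L - (((c ++ [line]).length : Nat) : Int)).toNat = (L - c.length).toNat - 1 := by
      simp; omega
    have h2 : (L - (c.length : Int)).toNat = ((L - c.length).toNat - 1) + 1 := by omega
    rw [h1, h2, List.take_succ_cons, List.append_assoc]
    rfl
  · have h1 : (L - (c.length : Int)).toNat = 0 := by omega
    simp [h1]

-- characterisation of B's fold: existing columns fill up from the stream, empty lines open new ones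
theorem foldl_step (L : Int) :
    ∀ (rest : List String) (cols : List (List String)),
      rest.foldl (stepCols L) cols =
        cols.map (fun c => c ++ rest.take (L - (c.length : Int)).toNat) ++ newColsL L rest := by
  intro rest
  induction rest with
  | nil => intro cols; simp [newColsL]
  | cons line rest ih =>
    intro cols
    rw [List.foldl_cons, ih]
    have hmap : (cols.map (fun c => if (c.length : Int) < L then c ++ [line] else c)).map
        (fun c => c ++ rest.take (L - (c.length : Int)).toNat)
        = cols.map (fun c => c ++ (line :: rest).take (L - (c.length : Int)).toNat) := by
      rw [List.map_map]
      exact List.map_congr_left (fun c _ => fill_upd L line rest c)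
    unfold stepCols
    by_cases h : is_empty_line_py line
    · simp only [h, if_true, newColsL]
      rw [List.map_append, hmap, List.append_assoc]
      simp
    · simp only [h, newColsL, Bool.false_eq_true, if_false]
      rw [hmap, List.nil_append]

-- the collected columns, indexed by the empty-line positions of the suffix
theorem newCols_eq (L : Int) :
    ∀ (suf : List String) (s : Int),
      newColsL L suf =
        ((PySem.List.enumerate suf s).filter (fun p => is_empty_line_py p.2)).map
          (fun p => (suf.drop (p.1 - s + 1).toNat).take L.toNat) := by
  intro suf
  induction suf with
  | nil => intro s; simp [newColsL, PySem.List.enumerate_nil]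
  | cons line rest ih =>
    intro s
    rw [PySem.List.enumerate_cons, List.filter_cons]
    have hmap : ((PySem.List.enumerate rest (s+1)).filter (fun p => is_empty_line_py p.2)).map
        (fun p => ((line :: rest).drop (p.1 - s + 1).toNat).take L.toNat)
        = ((PySem.List.enumerate rest (s+1)).filter (fun p => is_empty_line_py p.2)).map
        (fun p => (rest.drop (p.1 - (s+1) + 1).toNat).take L.toNat) := by
      apply List.map_congr_left
      intro p hp
      obtain ⟨k, hk, hpk⟩ := (PySem.List.mem_enumerate_iff _ _ _).mp (List.mem_of_mem_filter hp)
      have hp1 : p.1 = s + 1 + k := by rw [hpk]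
      have h1 : (p.1 - s + 1).toNat = (k + 1) + 1 := by omega
      have h2 : (p.1 - (s+1) + 1).toNat = k + 1 := by omega
      rw [h1, h2, List.drop_succ_cons]
    by_cases h : is_empty_line_py line
    · simp only [h, if_true, newColsL, List.map_cons]
      rw [hmap, ← ih (s+1)]
      simp
    · simp only [newColsL, h, Bool.false_eq_true, if_false]
      rw [hmap, ← ih (s+1)]
      simp

-- B's first loop with `first` already set: the next empty line ends it
theorem findL_some : ∀ (lst : List (Int × String)) (f : Int),
    findL_py lst (some f) =
      match (lst.filter (fun p => is_empty_line_py p.2)).map (fun p => p.1) with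
      | a :: _ => some (a - f - 1)
      | [] => none := by
  intro lst
  induction lst with
  | nil => intro f; rfl
  | cons p rest ih =>
    intro f
    obtain ⟨i, l⟩ := p
    by_cases h : is_empty_line_py l
    · simp [findL_py, h]
    · simp [findL_py, h, ih f]

-- B's first loop computes the gap between the first two empty-line indices
theorem findL_none : ∀ (lst : List (Int × String)),
    findL_py lst none =
      match (lst.filter (fun p => is_empty_line_py p.2)).map (fun p => p.1) with
      | a :: b :: _ => some (b - a - 1)
      | _ => none := by
  intro lst
  induction lst with
  | nil => rfl
  | cons p rest ih =>
    obtain ⟨i, l⟩ := p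
    by_cases h : is_empty_line_py l
    · simp only [findL_py, h, if_true, List.filter_cons, List.map_cons]
      rw [findL_some rest i]
      cases hm : (rest.filter (fun p => is_empty_line_py p.2)).map (fun p => p.1) with
      | nil => rfl
      | cons a t => rfl
    · simp only [findL_py, h, Bool.false_eq_true, if_false, List.filter_cons]
      exact ih

-- a fully-fed column is exactly A's indexed block
theorem block_eq (data : List String) (n L : Int) (hn : 0 ≤ n) (_hL : 0 ≤ L)
    (h : n + L < (data.length : Int)) :
    (data.drop (n + 1).toNat).take L.toNat =
      (PySem.List.pyRange 0 L 1).map (fun k => (PySem.List.pyGet? data (n + k + 1)).getD "") := by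
  apply List.ext_getElem
  · simp [PySem.List.length_pyRange_one]; omega
  · intro i h1 h2
    have hi : i < L.toNat := by simpa [PySem.List.length_pyRange_one] using h2
    have hidx : (n + 1).toNat + i < data.length := by omega
    rw [List.getElem_map, PySem.List.getElem_pyRange_one]
    rw [List.getElem_take, List.getElem_drop]
    have harg : n + (0 + (i:Int)) + 1 = (((n+1).toNat + i : Nat) : Int) := by omega
    rw [harg, PySem.List.pyGet?_natCast]
    simp [hidx]

theorem is_empty_eq (s : String) :
    is_empty_line_py s = (s == "\n" || s == "\r\n") := by
  unfold is_empty_line_py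
  split <;> simp_all

-- the ports' empty-index list is Pre_'s `e`
theorem E_eq_e (data : List String) :
    ((PySem.List.enumerate data).filter (fun p => is_empty_line_py p.2)).map (fun p => p.1)
      = ((List.range data.length).filter
          (fun n => data.getD n "" == "\n" || data.getD n "" == "\r\n")).map (fun n : Nat => (n : Int)) := by
  rw [PySem.List.enumerate_eq_map_pyRange (d := ""), PySem.List.pyRange_one,
      List.map_map, List.filter_map, List.map_map]
  have hlen : (PySem.List.len data - 0).toNat = data.length := by simp [pysem]
  rw [hlen]
  have hfil : List.filter ((fun (p : Int × String) => is_empty_line_py p.2) ∘ (fun j => (j, PySem.List.pyGetD data j "")) ∘ fun (k : Nat) => 0 + (k : Int)) (List.range data.length)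
      = List.filter (fun n => data.getD n "" == "\n" || data.getD n "" == "\r\n") (List.range data.length) := by
    apply List.filter_congr
    intro k hk
    simp [Function.comp, is_empty_eq, PySem.List.pyGetD_natCast]
  rw [hfil]
  simp [Function.comp]

-- transposing the per-index blocks row by row
theorem zipStarGo_blocks (f : Int → Int → String) (n : Int) (rest : List Int) :
    ∀ ks : List Int,
      zipStarGo (ks.map (f n)) (rest.map (fun m => ks.map (f m))) =
        ks.map (fun k => f n k :: rest.map (fun m => f m k)) := by
  intro ks
  induction ks generalizing n with
  | nil => simp [zipStarGo]
  | cons k ks ih =>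
    simp only [List.map_cons, zipStarGo]
    rw [if_pos (by simp)]
    refine congrArg₂ List.cons ?_ ?_
    · simp
    · rw [show List.map List.tail (rest.map fun m => f m k :: ks.map (f m)) =
            rest.map (fun m => ks.map (f m)) by simp]
      exact ih n

theorem ports_eq (data : List String) (hpre : Pre_screen_empty_lines_py data) :
    screen_empty_lines_py data = screen_empty_lines_py_alt data := by
  unfold screen_empty_lines_py screen_empty_lines_py_alt
  dsimp only
  have hfilt :
      ((PySem.List.enumerate data).filter
        (fun p => is_empty_line_py ((PySem.List.pyGet? data p.1).getD ""))) =
      ((PySem.List.enumerate data).filter (fun p => is_empty_line_py p.2)) := by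
    apply List.filter_congr
    intro p hp
    obtain ⟨k, hk, hpk⟩ := (PySem.List.mem_enumerate_iff _ _ _).mp hp
    rw [hpk]
    simp [List.getElem?_eq_getElem hk]
  rw [hfilt]
  set E : List Int :=
    ((PySem.List.enumerate data).filter (fun p => is_empty_line_py p.2)).map (fun p => p.1)
    with hE
  have hEe := E_eq_e data
  rw [← hE] at hEe
  unfold Pre_screen_empty_lines_py at hpre
  rw [← hEe] at hpre
  obtain ⟨hlen2, hbound⟩ := hpre
  obtain ⟨a, b, t, hEabt⟩ : ∃ a b t, E = a :: b :: t := by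
    match hm : E with
    | [] => simp at hlen2
    | [a] => simp at hlen2
    | a :: b :: t => exact ⟨a, b, t, rfl⟩
  have hget0 : PySem.List.pyGet? E 0 = some a := by
    have h01 : (0:Int) ≤ (t.length:Int) + 1 := by positivity
    rw [hEabt]; simp [PySem.List.pyGet?, PySem.List.pyIdx?, h01]
  have hget1 : PySem.List.pyGet? E 1 = some b := by
    rw [hEabt]; simp [PySem.List.pyGet?, PySem.List.pyIdx?]
  have hfind : findL_py (PySem.List.enumerate data) none = some (b - a - 1) := by
    rw [findL_none, ← hE, hEabt]
  have hab : a < b := by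
    have hp : (((List.range data.length).filter
        (fun n => data.getD n "" == "\n" || data.getD n "" == "\r\n")).map
          (fun n : Nat => (n : Int))).Pairwise (· < ·) := by
      apply List.Pairwise.map (fun n : Nat => (n : Int))
        (fun x y (h : x < y) => by simpa using Int.ofNat_lt.mpr h)
      exact (List.pairwise_lt_range).filter _
    rw [← hEe, hEabt] at hp
    exact (List.pairwise_cons.mp hp).1 b (by simp)
  have hL0 : (0:Int) ≤ b - a - 1 := by omega
  have hbnd : ∀ n ∈ E, n + (b - a - 1) < (data.length : Int) := by
    intro n hn
    have h := hbound n hn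
    rw [hEabt] at h
    simpa using h
  have hnn : ∀ n ∈ E, 0 ≤ n := by
    intro n hn
    rw [hEe] at hn
    obtain ⟨m, _, rfl⟩ := List.mem_map.mp hn
    positivity
  have hcols : data.foldl (stepCols (b - a - 1)) [] =
      E.map (fun n => (PySem.List.pyRange 0 (b - a - 1) 1).map
        (fun k => (PySem.List.pyGet? data (n + k + 1)).getD "")) := by
    rw [foldl_step (b - a - 1) data []]
    simp only [List.map_nil, List.nil_append]
    rw [newCols_eq (b - a - 1) data 0, hE, List.map_map]
    apply List.map_congr_left
    intro p hp
    have hpE : p.1 ∈ E := by rw [hE]; exact List.mem_map_of_mem hp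
    have h1 : p.1 - 0 + 1 = p.1 + 1 := by omega
    rw [h1]
    exact block_eq data p.1 (b - a - 1) (hnn _ hpE) hL0 (hbnd _ hpE)
  rw [hget0, hget1, hfind]
  simp only [Option.getD_some]
  rw [hcols, hEabt, List.map_cons]
  rw [show ∀ (x : List String) (l : List (List String)), pyZipStar (x :: l) = zipStarGo x l
        from fun _ _ => rfl]
  rw [zipStarGo_blocks (fun n k => (PySem.List.pyGet? data (n + k + 1)).getD "") a (b :: t)
        (PySem.List.pyRange 0 (b - a - 1) 1)]
  simp

-- ===== VERDICT (by name: the statement is the Claim_ definition above) =====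
theorem screen_empty_lines_py_spec : Claim_equal_screen_empty_lines_py := by
  intro data _ hpre
  unfold Spec_screen_empty_lines_py
  exact ports_eq data hpre
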